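-- pv_equiv track=rewrite | github.com/hartmaj2/plat-arch-solids-coloring | Code/evaluating_chrompolys.py | convert_to_exactly_n_colrs
-- ===== SOURCE A (Python) =====
-- import math
--
-- STARTING_NUM = 2
--
-- def convert_to_exactly_n_colrs(evaluations : list[int]) -> list[int]:
--     evals = [0 for _ in range(STARTING_NUM)] + evaluations # pad the evaluations so each index corresponds to the number of colors to use
--     exacts = [0 for _ in range(evals.count(0))] # the zero entries will be same
--     first_nonzero_pos = len(exacts)
--     exacts.append(evals[first_nonzero_pos]) # first nonzero entry is also identic
--     for n in range(first_nonzero_pos+1,len(evals)):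
--         num_clrings = evals[n]
--         for i in range(first_nonzero_pos,n):
--             num_clrings -= math.comb(n,i) * exacts[i]
--         exacts.append(num_clrings)
--     exacts = exacts[2:] # remove the padding
--     return exacts
-- ===== SOURCE B (Python) =====
-- def convert_to_exactly_n_colrs(evaluations: list[int]) -> list[int]:
--     # inverse binomial transform by in-place repeated finite differencing
--     work = [0, 0] + evaluations  # pad so index = number of colors
--     for i in range(len(work)):
--         for j in range(len(work) - 1, i, -1):
--             work[j] -= work[j - 1]
--     return work[2:]
-- ===== Notes on version B (the rewrite author's own statement) =====
-- stated objective: alternative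
-- what changed: A solves the triangular recurrence, recomputing math.comb(n,i) inside a nested loop (O(n^2) comb calls); B computes the inverse binomial transform directly by in-place repeated finite differencing passes, using no binomial coefficients at all.
-- intended difference: On lists where a zero entry occurs after a nonzero entry, A's count(0)-based guess of the first nonzero position overshoots and A returns values computed from a corrupted start index; B returns the true inverse binomial transform of the padded evaluations, the intended exact-n-color counts. — e.g. on convert_to_exactly_n_colrs([1, 0]): A returns [0, 0], B returns [1, -3]
import Mathlib
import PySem

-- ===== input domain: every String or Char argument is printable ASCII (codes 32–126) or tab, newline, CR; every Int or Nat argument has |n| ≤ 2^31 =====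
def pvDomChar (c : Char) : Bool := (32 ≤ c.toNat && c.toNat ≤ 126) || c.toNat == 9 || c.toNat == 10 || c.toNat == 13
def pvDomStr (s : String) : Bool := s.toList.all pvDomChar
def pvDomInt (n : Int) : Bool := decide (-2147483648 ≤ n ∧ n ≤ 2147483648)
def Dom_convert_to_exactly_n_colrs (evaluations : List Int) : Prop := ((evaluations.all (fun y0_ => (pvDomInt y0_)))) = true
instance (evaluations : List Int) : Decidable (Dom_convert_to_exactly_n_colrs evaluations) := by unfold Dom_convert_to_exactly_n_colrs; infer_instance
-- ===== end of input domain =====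

-- B replaces A's recurrence with repeated math.comb calls by an in-place inverse binomial
-- transform via repeated finite differencing (no binomial coefficients); equal to A outside
-- D_ (a zero entry after a nonzero entry), where A's start index is corrupted.

-- ===== PORT A =====
def convert_to_exactly_n_colrs (evaluations : List Int) : List Int :=
  let evals : List Int := List.replicate 2 (0:Int) ++ evaluations
  let exacts : List Int := List.replicate (evals.count 0) (0:Int)
  let first_nonzero_pos : Nat := exacts.length
  let exacts : List Int := exacts ++ [PySem.List.pyGetD evals (first_nonzero_pos : Int) 0]
  let exacts : List Int :=
    (PySem.List.pyRange ((first_nonzero_pos : Int) + 1) (evals.length : Int) 1).foldl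
      (fun exacts n =>
        let num_clrings := PySem.List.pyGetD evals n 0
        let num_clrings :=
          (PySem.List.pyRange (first_nonzero_pos : Int) n 1).foldl
            (fun acc i => acc - (Nat.choose n.toNat i.toNat : Int) * PySem.List.pyGetD exacts i 0)
            num_clrings
        exacts ++ [num_clrings]) exacts
  PySem.List.slice exacts (some 2) none

-- ===== PORT B =====
def convert_to_exactly_n_colrs_alt (evaluations : List Int) : List Int :=
  let work : List Int := [0, 0] ++ evaluations
  let work : List Int :=
    (PySem.List.pyRange 0 (work.length : Int) 1).foldl
      (fun w i =>
        (PySem.List.pyRange ((w.length : Int) - 1) i (-1)).foldl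
          (fun w j =>
            PySem.List.pySetD w j (PySem.List.pyGetD w j 0 - PySem.List.pyGetD w (j - 1) 0))
          w) work
  PySem.List.slice work (some 2) none

-- ===== PRECONDITION & SPEC =====
-- Pre_ excludes exactly the inputs on which A raises IndexError: lists whose entries are all zero
-- (then evals[first_nonzero_pos] reads one past the end).
def Pre_convert_to_exactly_n_colrs (evaluations : List Int) : Prop :=
  ∃ x ∈ evaluations, x ≠ 0
instance (evaluations : List Int) : Decidable (Pre_convert_to_exactly_n_colrs evaluations) := by
  unfold Pre_convert_to_exactly_n_colrs; infer_instance

def pvWitness_convert_to_exactly_n_colrs : List Int := [0, 6, 18]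

-- On lists where a zero entry occurs after a nonzero entry, A's count(0)-based guess of the
-- first nonzero position is wrong and it returns values computed from a corrupted start index;
-- B returns the true inverse binomial transform, the intended exact-n-color counts.
def D_convert_to_exactly_n_colrs (evaluations : List Int) : Prop :=
  (0:Int) ∈ evaluations.dropWhile (fun x => x == 0)
instance (evaluations : List Int) : Decidable (D_convert_to_exactly_n_colrs evaluations) := by
  unfold D_convert_to_exactly_n_colrs; infer_instance

def Spec_convert_to_exactly_n_colrs (evaluations : List Int) (out : List Int) : Prop :=
  ¬ D_convert_to_exactly_n_colrs evaluations → out = convert_to_exactly_n_colrs_alt evaluations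
instance (evaluations : List Int) (out : List Int) : Decidable (Spec_convert_to_exactly_n_colrs evaluations out) := by
  unfold Spec_convert_to_exactly_n_colrs; infer_instance

def pvDiffWitness_convert_to_exactly_n_colrs : List Int := [1, 0]
def pvDiffWitnessOut_convert_to_exactly_n_colrs : (List Int) × (List Int) := ([0, 0], [1, -3])

-- ===== CLAIM (what is proved, stated in full; the proofs are below) =====
def Claim_unchanged_convert_to_exactly_n_colrs : Prop :=
  ∀ (evaluations : List Int), Dom_convert_to_exactly_n_colrs evaluations →
    Pre_convert_to_exactly_n_colrs evaluations →
    Spec_convert_to_exactly_n_colrs evaluations (convert_to_exactly_n_colrs evaluations)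

def Claim_changed_convert_to_exactly_n_colrs : Prop :=
  Dom_convert_to_exactly_n_colrs (pvDiffWitness_convert_to_exactly_n_colrs) ∧
  Pre_convert_to_exactly_n_colrs (pvDiffWitness_convert_to_exactly_n_colrs) ∧
  D_convert_to_exactly_n_colrs (pvDiffWitness_convert_to_exactly_n_colrs) ∧
  convert_to_exactly_n_colrs (pvDiffWitness_convert_to_exactly_n_colrs) = pvDiffWitnessOut_convert_to_exactly_n_colrs.1 ∧
  convert_to_exactly_n_colrs_alt (pvDiffWitness_convert_to_exactly_n_colrs) = pvDiffWitnessOut_convert_to_exactly_n_colrs.2 ∧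
  pvDiffWitnessOut_convert_to_exactly_n_colrs.1 ≠ pvDiffWitnessOut_convert_to_exactly_n_colrs.2

-- ===== LEMMAS AND PROOFS =====

-- the inverse binomial transform, entrywise
def pvTI (g : Nat → Int) (n : Nat) : Int :=
  ∑ k ∈ Finset.range (n + 1), (-1 : Int) ^ (n - k) * (Nat.choose n k : Int) * g k

-- one differencing pass of B's loop, as a pure function
def pvOnePass (i : Nat) (w : List Int) : List Int :=
  (List.range w.length).map (fun j => if i < j then w.getD j 0 - w.getD (j - 1) 0 else w.getD j 0)

def pvPasses : Nat → List Int → List Int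
  | 0, w => w
  | i + 1, w => pvOnePass i (pvPasses i w)

theorem pvOnePass_length (i : Nat) (w : List Int) : (pvOnePass i w).length = w.length := by
  simp [pvOnePass]

theorem pvPasses_length (i : Nat) (w : List Int) : (pvPasses i w).length = w.length := by
  induction i with
  | zero => rfl
  | succ i ih => simp [pvPasses, pvOnePass_length, ih]

theorem pvOnePass_getD (i j : Nat) (w : List Int) (hj : j < w.length) :
    (pvOnePass i w).getD j 0 =
      if i < j then w.getD j 0 - w.getD (j - 1) 0 else w.getD j 0 := by
  simp [pvOnePass, List.getD, hj]

theorem pv_pascal (f : Nat → Int) (i j : Nat) :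
    (∑ m ∈ Finset.range (i + 1), (-1 : Int) ^ m * (Nat.choose i m : Int) * f (j - m))
      - (∑ m ∈ Finset.range (i + 1), (-1 : Int) ^ m * (Nat.choose i m : Int) * f (j - 1 - m))
    = ∑ m ∈ Finset.range (i + 2), (-1 : Int) ^ m * (Nat.choose (i + 1) m : Int) * f (j - m) := by
  rw [Finset.sum_range_succ' (fun m => (-1 : Int) ^ m * (Nat.choose (i + 1) m : Int) * f (j - m)) (i+1)]
  rw [Finset.sum_range_succ' (fun m => (-1 : Int) ^ m * (Nat.choose i m : Int) * f (j - m)) i]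
  have e1 : ∀ m : Nat, ((i + 1).choose (m + 1) : Int) = (i.choose m : Int) + (i.choose (m + 1) : Int) := by
    intro m; exact_mod_cast congrArg Nat.cast (Nat.choose_succ_succ i m)
  have e2 : ∀ m : Nat, j - 1 - m = j - (m + 1) := by intro m; omega
  simp only [e2]
  have expand : ∀ m ∈ Finset.range (i + 1),
      (-1 : Int) ^ (m + 1) * ((i + 1).choose (m + 1) : Int) * f (j - (m + 1))
        = ((-1 : Int) ^ (m + 1) * (i.choose m : Int) * f (j - (m + 1)))
          + ((-1 : Int) ^ (m + 1) * (i.choose (m + 1) : Int) * f (j - (m + 1))) := by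
    intro m _; rw [e1]; ring
  rw [Finset.sum_congr rfl expand, Finset.sum_add_distrib]
  rw [Finset.sum_range_succ (fun m => (-1 : Int) ^ (m + 1) * (i.choose (m + 1) : Int) * f (j - (m + 1))) i]
  simp [Nat.choose_succ_self]
  have e3 : ∀ x ∈ Finset.range (i + 1),
      (-1 : Int) ^ (x + 1) * (i.choose x : Int) * f (j - (x + 1))
        = -((-1 : Int) ^ x * (i.choose x : Int) * f (j - (x + 1))) := by
    intro x _; ring
  rw [Finset.sum_congr rfl e3, Finset.sum_neg_distrib]
  ring

theorem pvPasses_getD (i j : Nat) (w : List Int) (hj : j < w.length) :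
    (pvPasses i w).getD j 0 =
      ∑ m ∈ Finset.range (min i j + 1),
        (-1 : Int) ^ m * (Nat.choose (min i j) m : Int) * w.getD (j - m) 0 := by
  induction i generalizing j with
  | zero => simp [pvPasses]
  | succ i ih =>
    have hlen : j < (pvPasses i w).length := by rw [pvPasses_length]; exact hj
    rw [pvPasses, pvOnePass_getD i j _ hlen]
    by_cases hij : i < j
    · rw [if_pos hij]
      have hj1 : j - 1 < w.length := by omega
      rw [ih j hj, ih (j - 1) hj1]
      have hm1 : min i j = i := by omega
      have hm2 : min i (j - 1) = i := by omega
      have hm3 : min (i + 1) j = i + 1 := by omega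
      rw [hm1, hm2, hm3]
      have := pv_pascal (fun k => w.getD k 0) i j
      simpa using this
    · rw [if_neg hij]
      rw [ih j hj]
      have : min i j = min (i + 1) j := by omega
      rw [this]

theorem pvPasses_full (j : Nat) (w : List Int) (hj : j < w.length) :
    (pvPasses w.length w).getD j 0 = pvTI (fun k => w.getD k 0) j := by
  rw [pvPasses_getD _ _ _ hj]
  have hm : min w.length j = j := by omega
  rw [hm, pvTI]
  rw [← Finset.sum_range_reflect (fun k => (-1 : Int) ^ (j - k) * (Nat.choose j k : Int) * w.getD k 0) (j + 1)]
  apply Finset.sum_congr rfl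
  intro m hm'
  have hmj : m ≤ j := by have := Finset.mem_range.mp hm'; omega
  have h1 : j + 1 - 1 - m = j - m := by omega
  rw [h1]
  have h2 : j - (j - m) = m := by omega
  rw [h2]
  have h3 : Nat.choose j (j - m) = Nat.choose j m := Nat.choose_symm hmj
  rw [h3]

theorem pv_getD_set (w : List Int) (n j : Nat) (v : Int) (hn : n < w.length) :
    (w.set n v).getD j 0 = if j = n then v else w.getD j 0 := by
  by_cases h : j = n
  · subst h; simp [List.getD, hn]
  · simp [List.getD, List.getElem?_set_ne (by omega : n ≠ j), h]

theorem pv_fold_set (t : Nat) (w : List Int) (a : Int) (i : Nat)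
    (ht : (a - (i : Int)).toNat = t) (ha : a < (w.length : Int)) :
    (((PySem.List.pyRange a (i : Int) (-1)).foldl
        (fun w j =>
          PySem.List.pySetD w j (PySem.List.pyGetD w j 0 - PySem.List.pyGetD w (j - 1) 0)) w)).length
      = w.length ∧
    ∀ j : Nat, j < w.length →
      ((PySem.List.pyRange a (i : Int) (-1)).foldl
        (fun w j =>
          PySem.List.pySetD w j (PySem.List.pyGetD w j 0 - PySem.List.pyGetD w (j - 1) 0)) w).getD j 0
        = if (i : Int) < (j : Int) ∧ (j : Int) ≤ a then w.getD j 0 - w.getD (j - 1) 0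
          else w.getD j 0 := by
  induction t generalizing a w with
  | zero =>
    have hai : a ≤ (i : Int) := by omega
    rw [PySem.List.pyRange_neg_one_eq_nil hai]
    refine ⟨rfl, ?_⟩
    intro j hj
    rw [if_neg (by omega)]
    rfl
  | succ t ih =>
    have hia : (i : Int) < a := by omega
    rw [PySem.List.pyRange_neg_one_cons hia]
    simp only [List.foldl_cons]
    have ha0 : 0 ≤ a := by omega
    have haN : a.toNat < w.length := by omega
    have hstep : PySem.List.pySetD w a (PySem.List.pyGetD w a 0 - PySem.List.pyGetD w (a - 1) 0)
        = w.set a.toNat (w.getD a.toNat 0 - w.getD (a.toNat - 1) 0) := by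
      rw [PySem.List.pySetD_of_nonneg w _ ha0,
          PySem.List.pyGetD_of_nonneg w 0 ha0,
          PySem.List.pyGetD_of_nonneg w 0 (by omega : (0:Int) ≤ a - 1)]
      have hn1 : (a - 1).toNat = a.toNat - 1 := by omega
      rw [hn1]
    rw [hstep]
    set w' := w.set a.toNat (w.getD a.toNat 0 - w.getD (a.toNat - 1) 0) with hw'
    have hlen' : w'.length = w.length := by simp [hw']
    obtain ⟨ihl, ihg⟩ := ih w' (a - 1) (by omega) (by omega)
    refine ⟨by rw [ihl, hlen'], ?_⟩
    intro j hj
    rw [ihg j (by omega)]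
    have hget : ∀ k : Nat, w'.getD k 0 = if k = a.toNat then w.getD a.toNat 0 - w.getD (a.toNat - 1) 0 else w.getD k 0 := by
      intro k; exact pv_getD_set w a.toNat k _ haN
    by_cases hja : j = a.toNat
    · subst hja
      rw [if_neg (by omega), hget a.toNat, if_pos rfl, if_pos (by omega)]
    · by_cases hcond : (i : Int) < (j : Int) ∧ (j : Int) ≤ a - 1
      · rw [if_pos hcond, if_pos (by omega), hget j, hget (j - 1),
            if_neg hja, if_neg (by omega)]
      · rw [if_neg hcond, hget j, if_neg hja, if_neg (by omega)]

theorem pv_inner_fold (w : List Int) (i : Nat) :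
    (PySem.List.pyRange ((w.length : Int) - 1) (i : Int) (-1)).foldl
        (fun w j =>
          PySem.List.pySetD w j (PySem.List.pyGetD w j 0 - PySem.List.pyGetD w (j - 1) 0)) w
      = pvOnePass i w := by
  obtain ⟨hl, hg⟩ := pv_fold_set ((w.length : Int) - 1 - (i:Int)).toNat w ((w.length : Int) - 1) i rfl (by omega)
  apply List.ext_getElem (by rw [hl, pvOnePass_length])
  intro j hj1 hj2
  have hjw : j < w.length := by rw [hl] at hj1; exact hj1
  have h1 := hg j hjw
  rw [List.getD_eq_getElem _ _ hj1] at h1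
  rw [h1]
  have h2 := pvOnePass_getD i j w hjw
  rw [List.getD_eq_getElem _ _ hj2] at h2
  rw [h2]
  by_cases hij : i < j
  · rw [if_pos (by omega), if_pos hij]
  · rw [if_neg (by omega), if_neg hij]

theorem pv_outer_fold (w : List Int) (c : Nat) :
    (PySem.List.pyRange 0 (c : Int) 1).foldl
        (fun w i =>
          (PySem.List.pyRange ((w.length : Int) - 1) i (-1)).foldl
            (fun w j =>
              PySem.List.pySetD w j (PySem.List.pyGetD w j 0 - PySem.List.pyGetD w (j - 1) 0)) w) w
      = pvPasses c w := by
  induction c with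
  | zero =>
    have h0 : PySem.List.pyRange 0 ((0 : Nat) : Int) 1 = [] :=
      PySem.List.pyRange_one_eq_nil (by norm_num)
    rw [h0]
    rfl
  | succ c ih =>
    have hcast : ((c + 1 : Nat) : Int) = (c : Int) + 1 := by push_cast; ring
    rw [hcast, PySem.List.pyRange_one_succ_right (by positivity), List.foldl_append, ih]
    simp only [List.foldl_cons, List.foldl_nil]
    exact pv_inner_fold (pvPasses c w) c

theorem pvTI_prefix_zero (g : Nat → Int) (z i : Nat) (hz : ∀ k < z, g k = 0) (hi : i < z) :
    pvTI g i = 0 := by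
  apply Finset.sum_eq_zero
  intro k hk
  have := Finset.mem_range.mp hk
  rw [hz k (by omega)]
  ring

theorem pvTI_self (g : Nat → Int) (z : Nat) (hz : ∀ k < z, g k = 0) :
    pvTI g z = g z := by
  rw [pvTI, Finset.sum_range_succ]
  have h0 : ∑ k ∈ Finset.range z, (-1 : Int) ^ (z - k) * (Nat.choose z k : Int) * g k = 0 := by
    apply Finset.sum_eq_zero
    intro k hk
    rw [hz k (Finset.mem_range.mp hk)]
    ring
  simp [h0]

theorem pv_delta (n k : Nat) (hk : k ≤ n) :
    ∑ i ∈ Finset.range (n + 1), (Nat.choose n i : Int) * ((-1 : Int) ^ (i - k) * (Nat.choose i k : Int))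
      = if k = n then 1 else 0 := by
  have hsub : Finset.Ico k (n + 1) ⊆ Finset.range (n + 1) := by
    intro x hx; have := Finset.mem_Ico.mp hx; exact Finset.mem_range.mpr this.2
  have hzero : ∀ i ∈ Finset.range (n + 1), i ∉ Finset.Ico k (n + 1) →
      (Nat.choose n i : Int) * ((-1 : Int) ^ (i - k) * (Nat.choose i k : Int)) = 0 := by
    intro i hi hni
    have h1 : i < n + 1 := Finset.mem_range.mp hi
    have h2 : i < k := by
      by_contra hcon
      exact hni (Finset.mem_Ico.mpr ⟨by omega, h1⟩)
    rw [Nat.choose_eq_zero_of_lt h2]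
    simp
  rw [← Finset.sum_subset hsub hzero]
  rw [Finset.sum_Ico_eq_sum_range]
  have hrw : ∀ j ∈ Finset.range (n + 1 - k),
      (Nat.choose n (k + j) : Int) * ((-1 : Int) ^ (k + j - k) * (Nat.choose (k + j) k : Int))
        = (Nat.choose n k : Int) * ((-1 : Int) ^ j * (Nat.choose (n - k) j : Int)) := by
    intro j hj
    have h1 : k + j - k = j := by omega
    have h2 : (Nat.choose n (k + j)) * (Nat.choose (k + j) k) = Nat.choose n k * Nat.choose (n - k) j := by
      have := Nat.choose_mul (n := n) (k := k + j) (s := k) (by omega)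
      simpa using this
    have h2' : (Nat.choose n (k + j) : Int) * (Nat.choose (k + j) k : Int)
        = (Nat.choose n k : Int) * (Nat.choose (n - k) j : Int) := by exact_mod_cast h2
    rw [h1]
    linear_combination ((-1 : Int) ^ j) * h2'
  rw [Finset.sum_congr rfl hrw]
  rw [← Finset.mul_sum]
  have hnk : n + 1 - k = (n - k) + 1 := by omega
  rw [hnk, Int.alternating_sum_range_choose]
  by_cases h : k = n
  · subst h; simp
  · rw [if_neg (by omega : ¬ n - k = 0), if_neg h, mul_zero]

theorem pv_binom_inv (g : Nat → Int) (n : Nat) :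
    ∑ i ∈ Finset.range (n + 1), (Nat.choose n i : Int) * pvTI g i = g n := by
  have hext : ∀ i ∈ Finset.range (n + 1), (Nat.choose n i : Int) * pvTI g i
      = ∑ k ∈ Finset.range (n + 1), (Nat.choose n i : Int) * ((-1 : Int) ^ (i - k) * (Nat.choose i k : Int)) * g k := by
    intro i hi
    have hin : i < n + 1 := Finset.mem_range.mp hi
    have hsub : Finset.range (i + 1) ⊆ Finset.range (n + 1) := by
      intro x hx; have := Finset.mem_range.mp hx; exact Finset.mem_range.mpr (by omega)
    have hzero : ∀ k ∈ Finset.range (n + 1), k ∉ Finset.range (i + 1) →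
        (Nat.choose n i : Int) * ((-1 : Int) ^ (i - k) * (Nat.choose i k : Int)) * g k = 0 := by
      intro k hk hki
      have hik : i < k := by
        by_contra hcon
        exact hki (Finset.mem_range.mpr (by omega))
      rw [Nat.choose_eq_zero_of_lt hik]
      push_cast
      ring
    rw [pvTI, Finset.mul_sum, ← Finset.sum_subset hsub hzero]
    apply Finset.sum_congr rfl
    intro k _
    ring
  rw [Finset.sum_congr rfl hext, Finset.sum_comm]
  have hcol : ∀ k ∈ Finset.range (n + 1),
      ∑ i ∈ Finset.range (n + 1), (Nat.choose n i : Int) * ((-1 : Int) ^ (i - k) * (Nat.choose i k : Int)) * g k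
        = (if k = n then 1 else 0) * g k := by
    intro k hk
    rw [← Finset.sum_mul, pv_delta n k (by have := Finset.mem_range.mp hk; omega)]
  rw [Finset.sum_congr rfl hcol]
  simp

theorem pv_sum_range (f : Nat → Int) (n : Nat) :
    ((List.range n).map f).sum = ∑ i ∈ Finset.range n, f i := Int.neg_inj.mp rfl

theorem pv_foldl_sub {α : Type} (l : List α) (f : α → Int) (init : Int) :
    l.foldl (fun acc i => acc - f i) init = init - (l.map f).sum := by
  induction l generalizing init with
  | nil => simp
  | cons x xs ih => simp [ih]; ring

theorem pv_A_step (g : Nat → Int) (e : List Int) (z c : Nat)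
    (hgz : ∀ k < z, g k = 0)
    (hge : ∀ k, z ≤ k → k < e.length → g k = e.getD k 0)
    (hzc : z < c) (hcL : c < e.length) :
    (PySem.List.pyRange (z : Int) (c : Int) 1).foldl
        (fun acc i => acc - (Nat.choose ((c : Int)).toNat i.toNat : Int) *
          PySem.List.pyGetD ((List.range c).map (pvTI g)) i 0)
        (PySem.List.pyGetD e (c : Int) 0)
      = pvTI g c := by
  have hmap : (PySem.List.pyRange (z : Int) (c : Int) 1) =
      (List.range (c - z)).map (fun k => ((z + k : Nat) : Int)) := by
    rw [PySem.List.pyRange_one]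
    have : ((c : Int) - (z : Int)).toNat = c - z := by omega
    rw [this]
    apply List.map_congr_left
    intro k _
    push_cast
    ring
  rw [hmap, List.foldl_map, pv_foldl_sub, pv_sum_range, PySem.List.pyGetD_natCast]
  have hterm : ∀ k ∈ Finset.range (c - z),
      (Nat.choose ((c : Int)).toNat ((( (z + k : Nat) : Int))).toNat : Int) *
          PySem.List.pyGetD ((List.range c).map (pvTI g)) ((z + k : Nat) : Int) 0
        = (Nat.choose c (z + k) : Int) * pvTI g (z + k) := by
    intro k hk
    have hk' : z + k < c := by have := Finset.mem_range.mp hk; omega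
    rw [PySem.List.pyGetD_natCast, PySem.List.getD_map_range _ _ _ _ hk']
    have h2 : ((z : Int) + (k : Int)).toNat = z + k := by omega
    have h3 : ((c : Int)).toNat = c := by omega
    push_cast
    rw [h2, h3]
  rw [Finset.sum_congr rfl hterm]
  have hinv := pv_binom_inv g c
  rw [Finset.sum_range_succ] at hinv
  have hsplit : ∑ i ∈ Finset.range c, (Nat.choose c i : Int) * pvTI g i
      = ∑ k ∈ Finset.range (c - z), (Nat.choose c (z + k) : Int) * pvTI g (z + k) := by
    rw [Finset.range_eq_Ico, ← Finset.sum_Ico_consecutive _ (Nat.zero_le z) (le_of_lt hzc)]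
    have h0 : ∑ i ∈ Finset.Ico 0 z, (Nat.choose c i : Int) * pvTI g i = 0 := by
      apply Finset.sum_eq_zero
      intro i hi
      rw [pvTI_prefix_zero g z i hgz (by have := Finset.mem_Ico.mp hi; omega)]
      ring
    rw [h0, zero_add, Finset.sum_Ico_eq_sum_range]
    rw [Finset.range_eq_Ico]
  rw [← hsplit]
  have hgc : g c = e.getD c 0 := hge c (by omega) hcL
  simp at hinv
  omega

theorem pv_A_loop (g : Nat → Int) (e : List Int) (z : Nat)
    (hgz : ∀ k < z, g k = 0)
    (hge : ∀ k, z ≤ k → k < e.length → g k = e.getD k 0) :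
    ∀ (t c : Nat), e.length - c = t → z < c → c ≤ e.length →
    (PySem.List.pyRange (c : Int) (e.length : Int) 1).foldl
      (fun exacts n =>
        exacts ++ [(PySem.List.pyRange (z : Int) n 1).foldl
          (fun acc i => acc - (Nat.choose n.toNat i.toNat : Int) * PySem.List.pyGetD exacts i 0)
          (PySem.List.pyGetD e n 0)])
      ((List.range c).map (pvTI g))
    = (List.range e.length).map (pvTI g) := by
  intro t
  induction t with
  | zero =>
    intro c ht _ _
    have hc : c = e.length := by omega
    subst hc
    rw [PySem.List.pyRange_one_eq_nil (le_refl _)]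
    rfl
  | succ t ih =>
    intro c ht hzc hcL
    have hcL' : c < e.length := by omega
    rw [PySem.List.pyRange_one_cons (by exact_mod_cast hcL')]
    rw [List.foldl_cons]
    have hstep := pv_A_step g e z c hgz hge hzc hcL'
    rw [hstep]
    have happ : ((List.range c).map (pvTI g)) ++ [pvTI g c] = (List.range (c + 1)).map (pvTI g) := by
      rw [List.range_succ, List.map_append]
      rfl
    rw [happ]
    have hcast : ((c : Int) + 1) = ((c + 1 : Nat) : Int) := by push_cast; ring
    rw [hcast]
    exact ih (c + 1) (by omega) (by omega) (by omega)

-- if no zero follows a nonzero entry, the zeros of l are exactly a prefix of length l.count 0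
theorem pv_prefix (l : List Int) (h : (0:Int) ∉ l.dropWhile (fun x => x == 0)) :
    List.replicate (l.count 0) (0:Int) ++ l.drop (l.count 0) = l := by
  induction l with
  | nil => rfl
  | cons a t ih =>
    by_cases ha : a = 0
    · subst ha
      have hdw : ((0:Int) :: t).dropWhile (fun x => x == 0) = t.dropWhile (fun x => x == 0) := by
        simp [List.dropWhile]
      rw [hdw] at h
      have hcount : ((0:Int) :: t).count 0 = t.count 0 + 1 := by
        simp
      rw [hcount]
      simp only [List.replicate_succ, List.drop_succ_cons, List.cons_append]
      rw [ih h]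
    · have hdw : (a :: t).dropWhile (fun x => x == 0) = a :: t := by
        rw [List.dropWhile_cons_of_neg (by simpa using ha)]
      rw [hdw] at h
      have hcount : (a :: t).count 0 = 0 := by
        rw [List.count_eq_zero]
        exact h
      rw [hcount]
      simp

-- ===== VERDICT (by name: the statement is the Claim_ definition above) =====
theorem convert_to_exactly_n_colrs_spec : Claim_unchanged_convert_to_exactly_n_colrs := by
  intro evaluations _ hpre
  unfold Spec_convert_to_exactly_n_colrs
  intro hD
  unfold convert_to_exactly_n_colrs convert_to_exactly_n_colrs_alt
  simp only [List.length_replicate]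
  have he2 : ([0, 0] ++ evaluations : List Int) = List.replicate 2 (0:Int) ++ evaluations := rfl
  rw [he2]
  set e : List Int := List.replicate 2 (0:Int) ++ evaluations with he
  set z : Nat := List.count 0 e with hzdef
  -- from ¬D_: zeros of e are exactly a prefix of length z
  have hDe : (0:Int) ∉ e.dropWhile (fun x => x == 0) := by
    unfold D_convert_to_exactly_n_colrs at hD
    intro hmem
    apply hD
    have : e.dropWhile (fun x => x == 0) = evaluations.dropWhile (fun x => x == 0) := by
      rw [he]
      rfl
    rwa [this] at hmem
  have hme : List.replicate z (0:Int) ++ e.drop z = e := pv_prefix e hDe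
  obtain ⟨x, hx, hxne⟩ := hpre
  have hxe : x ∈ e := by rw [he]; exact List.mem_append_right _ hx
  have hzle : z ≤ e.length := List.count_le_length
  have hzlen : z < e.length := by
    rcases Nat.lt_or_ge z e.length with h | h
    · exact h
    · exfalso
      have hzeq : List.count 0 e = e.length := by omega
      have hall := List.count_eq_length.mp hzeq
      exact hxne ((hall x hxe).symm)
  have hgz : ∀ k, k < z → e.getD k 0 = 0 := by
    intro k hk
    conv_lhs => rw [← hme]
    rw [List.getD, List.getElem?_append_left (by simpa using hk)]
    simp [hk]
  set g : Nat → Int := fun k => e.getD k 0 with hg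
  have hge : ∀ k, z ≤ k → k < e.length → g k = e.getD k 0 := by intro k _ _; rfl
  -- B side: the differencing passes compute pvTI of e, entrywise
  rw [pv_outer_fold e e.length]
  have hB : pvPasses e.length e = (List.range e.length).map (pvTI g) := by
    apply List.ext_getElem (by simp [pvPasses_length])
    intro j h1 h2
    simp only [List.getElem_map, List.getElem_range]
    have hj : j < e.length := by rw [pvPasses_length] at h1; exact h1
    rw [← List.getD_eq_getElem _ 0 h1]
    rw [pvPasses_full j e hj]
  rw [hB]
  -- A side
  rw [PySem.List.pyGetD_natCast e z 0]
  have hinit : (List.replicate z (0:Int) ++ [e.getD z 0])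
      = (List.range (z+1)).map (pvTI g) := by
    apply List.ext_getElem (by simp)
    intro i h1 h2
    simp only [List.getElem_map, List.getElem_range]
    by_cases hi : i < z
    · rw [List.getElem_append_left (by simpa using hi)]
      rw [pvTI_prefix_zero _ z i hgz hi]
      simp
    · have hiz : i = z := by simp at h1; omega
      subst hiz
      rw [List.getElem_append_right (by simp)]
      rw [pvTI_self _ z hgz]
      simp
  rw [hinit]
  rw [show ((z : Int) + 1) = ((z + 1 : Nat) : Int) by push_cast; ring]
  rw [pv_A_loop g e z hgz hge (e.length - (z+1)) (z+1) rfl (by omega) (by omega)]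

theorem convert_to_exactly_n_colrs_changed : Claim_changed_convert_to_exactly_n_colrs := by
  unfold Claim_changed_convert_to_exactly_n_colrs; decide
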